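-- pv_equiv track=rewrite | github.com/mishidemudong/mudong_leetcode | 连续子数组大于某值的最短数组长度.py | func
-- ===== SOURCE A (Python) =====
-- def func(array, target):
--
--     result = []
--     dp = [0] * (len(array))
--
--     for i in range(0, len(array)-1):
--         for j in range(i+1, len(array)+1):
--
--             if sum(array[i:j]) > target:
--                result.append(j-i)
--
--     return min(result)
-- ===== SOURCE B (Python) =====
-- def func(array, target):
--     n = len(array)
--     pre = [0]
--     for x in array:
--         pre.append(pre[-1] + x)
--     for L in range(1, n + 1):
--         for i in range(n - L + 1):
--             if pre[i + L] - pre[i] > target: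
--                 return L
--     return -1
-- ===== Notes on version B (the rewrite author's own statement) =====
-- stated objective: faster
-- what changed: B precomputes prefix sums once and searches lengths in increasing order with an early return on the first window exceeding target, instead of A's triple loop that re-sums every slice, collects all lengths and takes min at the end; B also considers the window starting at the last index, which A's off-by-one range skips.
-- intended difference: On arrays whose last element exceeds target while every earlier element does not, A's outer loop range(0, len(array)-1) never considers the length-1 subarray at the last index, so A returns a length >= 2 (e.g. 2 on ([1,5],3)) where B returns the intended shortest length 1. — e.g. on func([1, 5], 3): A returns 2, B returns 1
import Mathlib
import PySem

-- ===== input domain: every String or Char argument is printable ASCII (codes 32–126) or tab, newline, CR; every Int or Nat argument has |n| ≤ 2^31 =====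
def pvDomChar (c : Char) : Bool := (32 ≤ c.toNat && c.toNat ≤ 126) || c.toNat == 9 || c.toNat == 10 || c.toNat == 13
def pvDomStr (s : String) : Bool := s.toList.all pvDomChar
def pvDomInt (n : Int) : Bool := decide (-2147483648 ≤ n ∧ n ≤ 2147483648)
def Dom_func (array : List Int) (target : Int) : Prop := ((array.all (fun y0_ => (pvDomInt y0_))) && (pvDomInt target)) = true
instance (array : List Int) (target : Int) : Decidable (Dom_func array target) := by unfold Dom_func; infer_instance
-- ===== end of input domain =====

-- B replaces A's triple loop (re-summing every slice, collecting all lengths, min at the end) by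
-- prefix sums and an ascending-length search with early return; B also fixes A's off-by-one that
-- skips the length-1 window at the last index (stated as D_func below).


-- ===== PORT A =====
-- literal port of A; the unused local 'dp' is dead code and is not carried over;
-- min() of the empty result list raises ValueError — excluded by Pre_func, so '.getD 0' is never the value used.
def func (array : List Int) (target : Int) : Int :=
  let result : List Int :=
    (PySem.List.pyRange 0 ((array.length : Int) - 1) 1).foldl (fun res i =>
      (PySem.List.pyRange (i + 1) ((array.length : Int) + 1) 1).foldl (fun res j =>
        if (PySem.List.slice array (some i) (some j)).sum > target then res ++ [j - i] else res)
        res) []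
  (PySem.List.min? result (fun x => x)).getD 0

-- ===== PORT B =====
-- port of Source B: prefix sums built once; first length L (small to large) with some window sum > target.
def func_alt (array : List Int) (target : Int) : Int :=
  let n := array.length
  let pre := array.foldl (fun pre x => pre ++ [pre.getLastD 0 + x]) [0]
  match (List.range n).find? (fun k =>
      (List.range (n - (k + 1) + 1)).any (fun i =>
        decide (pre.getD (i + (k + 1)) 0 - pre.getD i 0 > target))) with
  | some k => (k : Int) + 1
  | none => -1

-- ===== PRECONDITION & SPEC =====
-- Pre_func: exactly the inputs on which A returns (its result list is nonempty: some subarray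
-- not starting at the last index has sum > target); elsewhere A raises ValueError on min([]).
def Pre_func (array : List Int) (target : Int) : Prop :=
  ∃ i ∈ List.range (array.length - 1), ∃ j ∈ List.range (array.length + 1),
    i < j ∧ ((array.drop i).take (j - i)).sum > target
instance (array : List Int) (target : Int) : Decidable (Pre_func array target) := by
  unfold Pre_func; infer_instance
def pvWitness_func : List Int × Int := ([1, 2, 3], 4)

-- On arrays whose last element exceeds target while every earlier element does not, A's outer loop
-- range(0, len(array)-1) never considers the length-1 subarray at the last index, so A returns a
-- length ≥ 2 where B returns the intended shortest length 1.
def D_func (array : List Int) (target : Int) : Prop :=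
  array ≠ [] ∧ array.getLastD 0 > target ∧ ∀ x ∈ array.dropLast, x ≤ target
instance (array : List Int) (target : Int) : Decidable (D_func array target) := by
  unfold D_func; infer_instance

def Spec_func (array : List Int) (target : Int) (out : Int) : Prop :=
  ¬ D_func array target → out = func_alt array target
instance (array : List Int) (target : Int) (out : Int) : Decidable (Spec_func array target out) := by
  unfold Spec_func; infer_instance

def pvDiffWitness_func : List Int × Int := ([1, 5], 3)
def pvDiffWitnessOut_func : Int × Int := (2, 1)

-- ===== CLAIM (what is proved, stated in full; the proofs are below) =====
def Claim_unchanged_func : Prop := ∀ (array : List Int) (target : Int), Dom_func array target → Pre_func array target → Spec_func array target (func array target)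
def Claim_changed_func : Prop := Dom_func (pvDiffWitness_func.1) (pvDiffWitness_func.2) ∧ Pre_func (pvDiffWitness_func.1) (pvDiffWitness_func.2) ∧ D_func (pvDiffWitness_func.1) (pvDiffWitness_func.2) ∧ func (pvDiffWitness_func.1) (pvDiffWitness_func.2) = pvDiffWitnessOut_func.1 ∧ func_alt (pvDiffWitness_func.1) (pvDiffWitness_func.2) = pvDiffWitnessOut_func.2 ∧ pvDiffWitnessOut_func.1 ≠ pvDiffWitnessOut_func.2
def Claim_exact_func : Prop := ∀ (array : List Int) (target : Int), Dom_func array target → Pre_func array target → D_func array target → func array target ≠ func_alt array target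

-- ===== LEMMAS AND PROOFS =====

-- the list A accumulates (same literal body as in func)
def resultA (array : List Int) (target : Int) : List Int :=
  (PySem.List.pyRange 0 ((array.length : Int) - 1) 1).foldl (fun res i =>
    (PySem.List.pyRange (i + 1) ((array.length : Int) + 1) 1).foldl (fun res j =>
      if (PySem.List.slice array (some i) (some j)).sum > target then res ++ [j - i] else res)
      res) []

theorem func_eq (array : List Int) (target : Int) :
    func array target = (PySem.List.min? (resultA array target) (fun x => x)).getD 0 := rfl

-- window test: sum of the L-window starting at i exceeds target
def winB (array : List Int) (target : Int) (i L : Nat) : Bool :=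
  decide (((array.drop i).take L).sum > target)

theorem mem_resultA (array : List Int) (target : Int) (v : Int) :
    v ∈ resultA array target
    ↔ ∃ k jn : Nat, k + 1 < array.length ∧ k < jn ∧ jn ≤ array.length ∧
        winB array target k (jn - k) = true ∧ v = (jn : Int) - (k : Int) := by
  unfold resultA
  have h1 : (PySem.List.pyRange 0 ((array.length : Int) - 1) 1).foldl (fun res i =>
      (PySem.List.pyRange (i + 1) ((array.length : Int) + 1) 1).foldl (fun res j =>
        if (PySem.List.slice array (some i) (some j)).sum > target then res ++ [j - i] else res)
        res) ([] : List Int)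
      = (PySem.List.pyRange 0 ((array.length : Int) - 1) 1).foldl (fun res i =>
          res ++ ((PySem.List.pyRange (i + 1) ((array.length : Int) + 1) 1).filter
            (fun j => decide ((PySem.List.slice array (some i) (some j)).sum > target))).map
              (fun j => j - i)) ([] : List Int) := by
    apply PySem.List.foldl_congr_mem
    intro acc i _
    exact PySem.List.foldl_append_ite (p := fun j => (PySem.List.slice array (some i) (some j)).sum > target) (f := fun j => j - i) _ _
  rw [h1, PySem.List.foldl_append_eq_flatMap]
  simp only [List.nil_append, List.mem_flatMap, List.mem_map, List.mem_filter,
    PySem.List.mem_pyRange_one]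
  constructor
  · rintro ⟨a, ⟨ha0, ha1⟩, a1, ⟨⟨hj1, hj2⟩, hs⟩, hv⟩
    refine ⟨a.toNat, a1.toNat, by omega, by omega, by omega, ?_, by omega⟩
    rw [PySem.List.slice_toNat array ha0 (by omega)] at hs
    simpa [winB] using hs
  · rintro ⟨k, jn, hk, hkj, hjn, hw, hv⟩
    refine ⟨(k : Int), ⟨by omega, by omega⟩, (jn : Int), ⟨⟨by omega, by omega⟩, ?_⟩, by omega⟩
    rw [decide_eq_true_iff, PySem.List.slice_natCast]
    simpa [winB] using hw

theorem buildPre_eq (array : List Int) :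
    array.foldl (fun pre x => pre ++ [pre.getLastD 0 + x]) [0]
      = (List.range (array.length + 1)).map (fun i => (array.take i).sum) := by
  induction array using List.reverseRecOn with
  | nil => simp
  | append_singleton xs x ih =>
    rw [List.foldl_append, ih]
    simp only [List.foldl_cons, List.foldl_nil, List.length_append, List.length_cons,
      List.length_nil, Nat.zero_add]
    rw [List.range_succ (n := xs.length + 1), List.map_append, List.map_singleton]
    congr 1
    · apply List.map_congr_left
      intro i hi
      rw [List.mem_range] at hi
      rw [List.take_append_of_le_length (by omega)]
    · congr 1
      rw [List.range_succ (n := xs.length), List.map_append, List.map_singleton,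
        List.getLastD_concat]
      rw [List.take_of_length_le (by simp : (xs ++ [x]).length ≤ xs.length + 1),
        List.sum_append, List.sum_cons, List.sum_nil, List.take_length]
      ring

theorem find?_range_eq_some {p : Nat → Bool} {n k : Nat} (hk : k < n) (hp : p k = true)
    (hmin : ∀ k' < k, p k' = false) : (List.range n).find? p = some k := by
  induction n with
  | zero => omega
  | succ n ih =>
    rw [List.range_succ, List.find?_append]
    by_cases h : k < n
    · rw [ih h]
      rfl
    · have hkn : k = n := by omega
      subst hkn
      have hnone : (List.range k).find? p = none := by
        rw [List.find?_eq_none]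
        intro x hx
        rw [List.mem_range] at hx
        simp [hmin x hx]
      rw [hnone]
      simp [List.find?, hp]

theorem win_sub (array : List Int) (i L : Nat) :
    (array.take (i + L)).sum - (array.take i).sum = ((array.drop i).take L).sum := by
  rw [List.take_add, List.sum_append]
  ring

theorem elem_win (array : List Int) (i : Nat) (h : i < array.length) :
    ((array.drop i).take 1).sum = array[i] := by
  rw [List.drop_eq_getElem_cons h, List.take_succ_cons, List.take_zero, List.sum_cons,
    List.sum_nil, add_zero]

theorem last_win (array : List Int) (h : array ≠ []) :
    ((array.drop (array.length - 1)).take 1).sum = array.getLastD 0 := by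
  induction array with
  | nil => simp at h
  | cons a l ih =>
    cases l with
    | nil => simp
    | cons b t =>
      have h2 : (b :: t) ≠ [] := by simp
      simpa using ih h2

-- B's search predicate, with the prefix list rewritten into window sums
theorem pred_eq (array : List Int) (target : Int) (k : Nat) (hk : k < array.length) :
    ((List.range (array.length - (k + 1) + 1)).any (fun i =>
      decide ((array.foldl (fun pre x => pre ++ [pre.getLastD 0 + x]) [0]).getD (i + (k + 1)) 0
        - (array.foldl (fun pre x => pre ++ [pre.getLastD 0 + x]) [0]).getD i 0 > target)))
    = (List.range (array.length - (k + 1) + 1)).any (fun i => winB array target i (k + 1)) := by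
  apply PySem.List.any_congr_mem
  intro i hi
  rw [List.mem_range] at hi
  rw [buildPre_eq, PySem.List.getD_map_range _ _ _ _ (by omega),
    PySem.List.getD_map_range _ _ _ _ (by omega), win_sub]
  rfl

theorem func_spec : Claim_unchanged_func := by
  intro array target _ hpre hnd
  obtain ⟨i0, hi0m, j0, hj0m, hij0, hsum0⟩ := hpre
  rw [List.mem_range] at hi0m hj0m
  have hmem0 : ((j0 : Int) - (i0 : Int)) ∈ resultA array target :=
    (mem_resultA array target _).mpr ⟨i0, j0, by omega, hij0, by omega,
      by simpa [winB] using hsum0, rfl⟩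
  obtain ⟨m, hm⟩ : ∃ m, PySem.List.min? (resultA array target) (fun x => x) = some m := by
    cases hmin : PySem.List.min? (resultA array target) (fun x => x) with
    | none =>
      rw [PySem.List.min?_eq_none_iff] at hmin
      rw [hmin] at hmem0
      simp at hmem0
    | some m => exact ⟨m, rfl⟩
  have hfunc : func array target = m := by rw [func_eq, hm]; rfl
  obtain ⟨k1, jn1, hk1, hkj1, hjn1, hw1, hv1⟩ :=
    (mem_resultA array target m).mp (PySem.List.min?_mem hm)
  have hminR : ∀ y ∈ resultA array target, m ≤ y := fun y hy => PySem.List.min?_isMin hm y hy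
  have hfind : (List.range array.length).find? (fun k =>
      (List.range (array.length - (k + 1) + 1)).any (fun i =>
        decide ((array.foldl (fun pre x => pre ++ [pre.getLastD 0 + x]) [0]).getD (i + (k + 1)) 0
          - (array.foldl (fun pre x => pre ++ [pre.getLastD 0 + x]) [0]).getD i 0 > target)))
      = some (jn1 - k1 - 1) := by
    apply find?_range_eq_some (by omega)
    · rw [pred_eq array target _ (by omega)]
      rw [show jn1 - k1 - 1 + 1 = jn1 - k1 from by omega, List.any_eq_true]
      exact ⟨k1, List.mem_range.mpr (by omega), hw1⟩
    · intro k' hk'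
      rw [pred_eq array target _ (by omega), List.any_eq_false]
      intro i hi
      rw [List.mem_range] at hi
      simp only [winB, decide_eq_true_eq]
      intro hgt
      by_cases hcase : i + 1 < array.length
      · have hmemL : ((k' : Int) + 1) ∈ resultA array target := by
          apply (mem_resultA array target _).mpr
          refine ⟨i, i + (k' + 1), hcase, by omega, by omega, ?_, by push_cast; ring⟩
          simp only [winB, Nat.add_sub_cancel_left, decide_eq_true_eq]
          exact hgt
        have := hminR _ hmemL
        omega
      · have hle : i + (k' + 1) ≤ array.length := by omega
        have hi_eq : i = array.length - 1 := by omega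
        have hL1 : k' = 0 := by omega
        have hne : array ≠ [] := List.ne_nil_of_length_pos (by omega)
        have hlast : array.getLastD 0 > target := by
          rw [← last_win array hne]
          rw [hi_eq, hL1] at hgt
          simpa using hgt
        obtain ⟨x, hxmem, hxgt⟩ : ∃ x ∈ array.dropLast, x > target := by
          by_contra hno
          push Not at hno
          exact hnd ⟨hne, hlast, hno⟩
        obtain ⟨ix, hix, hxeq⟩ := List.mem_iff_getElem.mp hxmem
        have hixlt : ix + 1 < array.length := by
          rw [List.length_dropLast] at hix
          omega
        have hwx : winB array target ix 1 = true := by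
          simp only [winB, decide_eq_true_eq]
          rw [elem_win array ix (by omega), ← List.getElem_dropLast hix, hxeq]
          exact hxgt
        have hmem1 : ((1 : Int)) ∈ resultA array target := by
          apply (mem_resultA array target _).mpr
          refine ⟨ix, ix + 1, hixlt, by omega, by omega, ?_, by push_cast; ring⟩
          simpa [Nat.add_sub_cancel_left] using hwx
        have := hminR _ hmem1
        omega
  have halt : func_alt array target = ((jn1 - k1 - 1 : Nat) : Int) + 1 := by
    simp only [func_alt]
    rw [hfind]
  rw [hfunc, halt]
  omega

theorem func_changed : Claim_changed_func := by
  unfold Claim_changed_func; decide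

theorem func_tight : Claim_exact_func := by
  intro array target _ hpre hd
  obtain ⟨hne, hlast, hall⟩ := hd
  obtain ⟨i0, hi0m, j0, hj0m, hij0, hsum0⟩ := hpre
  rw [List.mem_range] at hi0m hj0m
  have hmem0 : ((j0 : Int) - (i0 : Int)) ∈ resultA array target :=
    (mem_resultA array target _).mpr ⟨i0, j0, by omega, hij0, by omega,
      by simpa [winB] using hsum0, rfl⟩
  obtain ⟨m, hm⟩ : ∃ m, PySem.List.min? (resultA array target) (fun x => x) = some m := by
    cases hmin : PySem.List.min? (resultA array target) (fun x => x) with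
    | none =>
      rw [PySem.List.min?_eq_none_iff] at hmin
      rw [hmin] at hmem0
      simp at hmem0
    | some m => exact ⟨m, rfl⟩
  have hfunc : func array target = m := by rw [func_eq, hm]; rfl
  obtain ⟨k1, jn1, hk1, hkj1, hjn1, hw1, hv1⟩ :=
    (mem_resultA array target m).mp (PySem.List.min?_mem hm)
  have hfind : (List.range array.length).find? (fun k =>
      (List.range (array.length - (k + 1) + 1)).any (fun i =>
        decide ((array.foldl (fun pre x => pre ++ [pre.getLastD 0 + x]) [0]).getD (i + (k + 1)) 0
          - (array.foldl (fun pre x => pre ++ [pre.getLastD 0 + x]) [0]).getD i 0 > target)))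
      = some 0 := by
    apply find?_range_eq_some (by omega)
    · rw [pred_eq array target _ (by omega), List.any_eq_true]
      refine ⟨array.length - 1, List.mem_range.mpr (by omega), ?_⟩
      simp only [winB, decide_eq_true_eq]
      rw [last_win array hne]
      exact hlast
    · intro k' hk'
      omega
  have halt : func_alt array target = 1 := by
    simp only [func_alt]
    rw [hfind]
    simp
  have hm_ne : m ≠ 1 := by
    intro h1
    have hjk : jn1 = k1 + 1 := by omega
    have hgt : array[k1]'(by omega) > target := by
      rw [hjk, Nat.add_sub_cancel_left] at hw1
      simp only [winB, decide_eq_true_eq] at hw1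
      rw [elem_win array k1 (by omega)] at hw1
      exact hw1
    have hixd : k1 < array.dropLast.length := by
      rw [List.length_dropLast]
      omega
    have hle : array[k1]'(by omega) ≤ target := by
      rw [← List.getElem_dropLast hixd]
      exact hall _ (List.getElem_mem hixd)
    omega
  rw [hfunc, halt]
  exact hm_ne
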